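-- pv_equiv track=rewrite | github.com/anacarlaaf/mfp_maratona_feminina_de_programacao | curso2024/contest03/test.py | minimum_towers
-- ===== SOURCE A (Python) =====
-- def minimum_towers(n, cubes):
--     towers = []
--
--     for cube in cubes:
--         placed = False
--
--         for tower in towers:
--             if cube <= tower[-1]:
--                 tower.append(cube)
--                 placed = True
--                 break
--
--         if not placed:
--             towers.append([cube])
--
--     return len(towers)
-- ===== SOURCE B (Python) =====
-- def minimum_towers(n, cubes):
--     tops = []  # top cube of each tower, kept strictly increasing
--     for cube in cubes:
--         lo, hi = 0, len(tops)
--         while lo < hi:  # binary search: first index with tops[i] >= cube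
--             mid = (lo + hi) // 2
--             if tops[mid] < cube:
--                 lo = mid + 1
--             else:
--                 hi = mid
--         if lo == len(tops):
--             tops.append(cube)
--         else:
--             tops[lo] = cube
--     return len(tops)
-- ===== Notes on version B (the rewrite author's own statement) =====
-- stated objective: faster
-- what changed: B keeps only the sorted list of tower tops and binary-searches the placement position instead of keeping all towers and scanning them linearly for each cube.
import Mathlib
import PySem

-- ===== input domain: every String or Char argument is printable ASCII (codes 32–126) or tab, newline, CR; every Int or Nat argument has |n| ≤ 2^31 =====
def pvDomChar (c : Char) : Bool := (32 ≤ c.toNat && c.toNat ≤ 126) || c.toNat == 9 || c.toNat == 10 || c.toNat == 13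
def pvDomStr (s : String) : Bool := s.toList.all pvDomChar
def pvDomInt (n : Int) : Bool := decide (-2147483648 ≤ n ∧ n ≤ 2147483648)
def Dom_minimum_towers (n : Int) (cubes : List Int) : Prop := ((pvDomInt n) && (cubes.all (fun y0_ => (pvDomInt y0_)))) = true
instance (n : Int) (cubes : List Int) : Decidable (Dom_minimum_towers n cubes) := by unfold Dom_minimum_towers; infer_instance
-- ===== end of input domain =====

-- B replaces A's linear scan over whole towers by a binary search over the sorted list of
-- tower tops (patience sorting), an asymptotically faster algorithm with the same result.

-- ===== PORT A =====
-- inner `for tower in towers` loop with break: returns the updated towers if the cube was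
-- placed, none otherwise.  `tower[-1]` is ported as getLastD 0: towers are never empty
-- (each is created as [cube]), so Python's IndexError branch is unreachable.
def pvPlaceA (cube : Int) : List (List Int) → Option (List (List Int))
  | [] => none
  | t :: ts =>
    if cube ≤ t.getLastD 0 then some ((t ++ [cube]) :: ts)
    else (pvPlaceA cube ts).map (t :: ·)

-- one iteration of A's outer loop
def pvStepA (towers : List (List Int)) (cube : Int) : List (List Int) :=
  match pvPlaceA cube towers with
  | some ts => ts
  | none => towers ++ [[cube]]

def minimum_towers (n : Int) (cubes : List Int) : Int :=
  ((cubes.foldl pvStepA []).length : Int)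

-- ===== PORT B =====
-- the `while lo < hi` binary-search loop of Source B
def pvBisect (tops : List Int) (cube : Int) (lo hi : Nat) : Nat :=
  if lo < hi then
    let mid := (lo + hi) / 2
    if tops.getD mid 0 < cube then pvBisect tops cube (mid + 1) hi
    else pvBisect tops cube lo mid
  else lo
termination_by hi - lo
decreasing_by all_goals omega

-- one iteration of B's loop
def pvStepB (tops : List Int) (cube : Int) : List Int :=
  let i := pvBisect tops cube 0 tops.length
  if i = tops.length then tops ++ [cube] else tops.set i cube

def minimum_towers_alt (n : Int) (cubes : List Int) : Int :=
  ((cubes.foldl pvStepB []).length : Int)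

-- ===== PRECONDITION & SPEC =====
def Spec_minimum_towers (n : Int) (cubes : List Int) (out : Int) : Prop := out = minimum_towers_alt n cubes
instance (n : Int) (cubes : List Int) (out : Int) : Decidable (Spec_minimum_towers n cubes out) := by unfold Spec_minimum_towers; infer_instance

-- ===== CLAIM (what is proved, stated in full; the proofs are below) =====
def Claim_equal_minimum_towers : Prop := ∀ (n : Int) (cubes : List Int), Dom_minimum_towers n cubes → Spec_minimum_towers n cubes (minimum_towers n cubes)

-- ===== LEMMAS AND PROOFS =====

-- the tops of A's towers
def pvTops (towers : List (List Int)) : List Int := towers.map (·.getLastD 0)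

-- binary search returns the first index whose element is ≥ cube (= findIdx), on a
-- strictly increasing list
theorem pvBisect_eq (tops : List Int) (cube : Int)
    (hs : List.Pairwise (· < ·) tops) :
    ∀ (fuel lo hi : Nat), hi - lo ≤ fuel → hi ≤ tops.length →
    lo ≤ tops.findIdx (fun x => cube ≤ x) → tops.findIdx (fun x => cube ≤ x) ≤ hi →
    pvBisect tops cube lo hi = tops.findIdx (fun x => cube ≤ x) := by
  intro fuel
  induction fuel with
  | zero =>
    intro lo hi h1 _ h3 h4
    rw [pvBisect]
    simp only [if_neg (by omega : ¬ lo < hi)]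
    omega
  | succ f ih =>
    intro lo hi h1 h2 h3 h4
    rw [pvBisect]
    by_cases hlt : lo < hi
    · simp only [if_pos hlt]
      set K := tops.findIdx (fun x => cube ≤ x) with hK
      set mid := (lo + hi) / 2 with hmid
      have hmidlt : mid < tops.length := by omega
      have hgetD : tops.getD mid 0 = tops[mid] := List.getD_eq_getElem tops 0 hmidlt
      by_cases hc : tops.getD mid 0 < cube
      · simp only [if_pos hc]
        -- every index ≤ mid fails the predicate, so mid < K
        have hKgt : mid < K := by
          by_contra hcon
          have hKlt : K < tops.length := by omega
          have hp : (fun x => decide (cube ≤ x)) tops[K] = true := List.findIdx_getElem (w := hKlt)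
          simp only [decide_eq_true_eq] at hp
          have hle : tops[K] ≤ tops[mid] := by
            rcases Nat.lt_or_ge K mid with h | h
            · exact le_of_lt ((List.pairwise_iff_getElem.mp hs) K mid hKlt hmidlt h)
            · have : K = mid := by omega
              simp [this]
          rw [hgetD] at hc; omega
        exact ih (mid + 1) hi (by omega) h2 (by omega) h4
      · simp only [if_neg hc]
        -- predicate holds at mid, so K ≤ mid
        have hKle : K ≤ mid := by
          by_contra hcon
          have := List.not_of_lt_findIdx (p := fun x => decide (cube ≤ x)) (xs := tops)
            (i := mid) (by omega)
          simp only [decide_eq_false_iff_not, not_le] at this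
          rw [hgetD] at hc; omega
        exact ih lo mid (by omega) (by omega) h3 hKle
    · simp only [if_neg hlt]; omega

-- if the cube is not placed, A's step appends behind the head tower
theorem pvStepA_cons (cube : Int) (t : List Int) (ts : List (List Int))
    (h : ¬ cube ≤ t.getLastD 0) :
    pvStepA (t :: ts) cube = t :: pvStepA ts cube := by
  unfold pvStepA
  simp only [pvPlaceA, if_neg h]
  cases hp : pvPlaceA cube ts <;> simp [hp]

-- what A's step does to the list of tops, expressed through findIdx
theorem pvStepA_tops (cube : Int) (towers : List (List Int)) :
    pvTops (pvStepA towers cube) =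
      (let tops := pvTops towers
       let K := tops.findIdx (fun x => cube ≤ x)
       if K = tops.length then tops ++ [cube] else tops.set K cube) := by
  induction towers with
  | nil => simp [pvStepA, pvPlaceA, pvTops]
  | cons t ts ih =>
    by_cases h : cube ≤ t.getLastD 0
    · simp only [pvStepA, pvPlaceA, if_pos h]
      have hd : decide (cube ≤ t.getLastD 0) = true := by simpa using h
      simp only [pvTops, List.map_cons, List.findIdx_cons, hd, cond_true, List.length_cons,
        List.getLastD_concat]
      rw [if_neg (by omega), List.set_cons_zero]
    · rw [pvStepA_cons cube t ts h]
      have hd : decide (cube ≤ t.getLastD 0) = false := by simpa using h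
      simp only [pvTops, List.map_cons] at ih ⊢
      simp only [List.findIdx_cons, hd, cond_false, List.length_cons]
      by_cases hk : (List.map (·.getLastD 0) ts).findIdx (fun x => decide (cube ≤ x)) =
          (List.map (·.getLastD 0) ts).length
      · rw [if_pos hk] at ih
        rw [if_pos (by omega), ih, List.cons_append]
      · simp only [if_neg hk] at ih
        rw [if_neg (by omega), List.set_cons_succ, ih]

-- strict sortedness of the tops is preserved by the common step
theorem pvSorted_step (tops : List Int) (cube : Int)
    (hs : List.Pairwise (· < ·) tops) :
    List.Pairwise (· < ·)
      (let K := tops.findIdx (fun x => cube ≤ x)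
       if K = tops.length then tops ++ [cube] else tops.set K cube) := by
  set K := tops.findIdx (fun x => cube ≤ x) with hK
  by_cases hk : K = tops.length
  · simp only [if_pos hk]
    rw [List.pairwise_append]
    refine ⟨hs, by simp, ?_⟩
    intro a ha b hb
    simp only [List.mem_singleton] at hb
    obtain ⟨i, hi, rfl⟩ := List.getElem_of_mem ha
    have h2 := List.not_of_lt_findIdx (p := fun x => decide (cube ≤ x)) (xs := tops)
      (i := i) (by omega)
    simp only [decide_eq_false_iff_not, not_le] at h2
    rw [hb]
    exact h2
  · simp only [if_neg hk]
    have hKlt : K < tops.length := lt_of_le_of_ne List.findIdx_le_length hk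
    have hpK : cube ≤ tops[K] := by
      have := List.findIdx_getElem (p := fun x => decide (cube ≤ x)) (xs := tops) (w := hKlt)
      simpa using this
    rw [List.pairwise_iff_getElem] at hs ⊢
    intro i j hi hj hij
    simp only [List.length_set] at hi hj
    rw [List.getElem_set, List.getElem_set]
    have hlow : ∀ (m : Nat) (hm : m < K), tops[m]'(Nat.lt_trans hm hKlt) < cube := by
      intro m hm
      have := List.not_of_lt_findIdx (p := fun x => decide (cube ≤ x)) (xs := tops)
        (i := m) (by omega)
      simpa using this
    by_cases hiK : K = i
    · subst hiK
      rw [if_pos rfl, if_neg (by omega)]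
      exact lt_of_le_of_lt hpK (hs K j hi hj hij)
    · rw [if_neg hiK]
      by_cases hjK : K = j
      · subst hjK
        rw [if_pos rfl]
        exact hlow i hij
      · rw [if_neg hjK]
        exact hs i j hi hj hij

-- one B step on the tops equals the common step (binary search = findIdx)
theorem pvStepB_eq (tops : List Int) (cube : Int)
    (hs : List.Pairwise (· < ·) tops) :
    pvStepB tops cube =
      (let K := tops.findIdx (fun x => cube ≤ x)
       if K = tops.length then tops ++ [cube] else tops.set K cube) := by
  unfold pvStepB
  rw [pvBisect_eq tops cube hs tops.length 0 tops.length (by omega) le_rfl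
    (Nat.zero_le _) List.findIdx_le_length]

-- main invariant: A's fold and B's fold stay related by pvTops
theorem pvFold_eq (cubes : List Int) :
    ∀ (towers : List (List Int)), List.Pairwise (· < ·) (pvTops towers) →
    pvTops (cubes.foldl pvStepA towers) = cubes.foldl pvStepB (pvTops towers) := by
  induction cubes with
  | nil => intro towers _; simp
  | cons c cs ih =>
    intro towers hs
    simp only [List.foldl_cons]
    have hstep : pvTops (pvStepA towers c) = pvStepB (pvTops towers) c := by
      rw [pvStepA_tops, pvStepB_eq _ _ hs]
    rw [← hstep]
    apply ih
    rw [pvStepA_tops]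
    exact pvSorted_step (pvTops towers) c hs

-- ===== VERDICT (by name: the statement is the Claim_ definition above) =====
theorem minimum_towers_spec : Claim_equal_minimum_towers := by
  intro n cubes _
  unfold Spec_minimum_towers minimum_towers minimum_towers_alt
  have h := pvFold_eq cubes [] (by simp [pvTops])
  have : (cubes.foldl pvStepA []).length = (cubes.foldl pvStepB []).length := by
    have := congrArg List.length h
    simpa [pvTops] using this
  rw [this]
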